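-- pv_equiv track=rewrite | github.com/valdolab/InterviewsCC | findN.py | findN
-- ===== SOURCE A (Python) =====
-- from collections import deque
--
-- def findN(string,p,q):
--     niter = 0
--     #listStr = [i for i in string]
--     listStr = deque([i for i in string])
--     while True:
--         flag = False
--         for i in range(p):
--             listStr.appendleft(listStr.pop())
--             niter = niter + 1
--             st = ''.join(listStr)
--             if st == string:
--                 flag = True
--
--         if flag:
--             break
--
--         for i in range(q):
--             listStr.appendleft(listStr.pop())
--             niter = niter + 1
--             st = ''.join(listStr)
--             if st == string:
--                 flag = True
--         if flag:
--             break
--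
--     return niter
--
-- string = "abcabc"
--
-- p = 1
--
-- q = 1
-- ===== SOURCE B (Python) =====
-- def findN(string, p, q):
--     # minimal rotation period d: first index >= 1 where string occurs in string+string
--     d = (string + string).index(string, 1)
--     pp = p if p > 0 else 0
--     qq = q if q > 0 else 0
--     s = pp + qq
--     k0 = (d - 1) // s          # complete p+q cycles before the batch containing step d
--     r = d - k0 * s
--     return k0 * s + pp if r <= pp else (k0 + 1) * s
-- ===== Notes on version B (the rewrite author's own statement) =====
-- stated objective: faster
-- what changed: B replaces A's step-by-step deque rotation loop by computing the minimal rotation period d as (s+s).index(s,1) and then finding the end of the first nonempty p/q batch reaching step d by closed-form arithmetic.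
import Mathlib
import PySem

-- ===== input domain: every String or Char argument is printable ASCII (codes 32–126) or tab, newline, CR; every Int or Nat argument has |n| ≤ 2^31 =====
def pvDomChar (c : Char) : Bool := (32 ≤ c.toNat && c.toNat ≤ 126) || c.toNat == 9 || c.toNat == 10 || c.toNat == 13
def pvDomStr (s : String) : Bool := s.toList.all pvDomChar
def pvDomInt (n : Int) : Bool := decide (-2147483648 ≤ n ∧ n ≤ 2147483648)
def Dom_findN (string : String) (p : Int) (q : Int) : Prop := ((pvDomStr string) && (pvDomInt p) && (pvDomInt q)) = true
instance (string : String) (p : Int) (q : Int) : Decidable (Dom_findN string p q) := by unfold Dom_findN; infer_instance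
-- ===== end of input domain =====

-- B computes the minimal rotation period once ((s+s).index(s,1)) and then the end of the
-- first nonempty p/q batch reaching it by closed-form arithmetic, instead of A's
-- rotation-by-rotation deque loop; a timing run reports B measurably faster.

-- ===== PORT A =====
-- listStr.appendleft(listStr.pop()): move the last character to the front.
-- Python's pop raises IndexError on an empty deque (excluded by Pre_); on [] we return [].
def pvRotr (l : List Char) : List Char :=
  match l.getLast? with
  | none => l
  | some c => c :: l.dropLast

-- one `for i in range(n)` batch over the state (listStr, niter, flag)
def pvBatchA (orig : List Char) : Nat → List Char × Int × Bool → List Char × Int × Bool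
  | 0, st => st
  | n+1, st =>
      let l' := pvRotr st.1
      pvBatchA orig n (l', st.2.1 + 1, if l' = orig then true else st.2.2)

-- the `while True` loop; the fuel argument only makes the recursion total:
-- under Pre_findN the loop provably returns within string.length + 1 rounds.
def pvLoopA (orig : List Char) (pp qq : Nat) : Nat → List Char × Int → Int
  | 0, st => st.2
  | f+1, st =>
      let r1 := pvBatchA orig pp (st.1, st.2, false)
      if r1.2.2 then r1.2.1
      else
        let r2 := pvBatchA orig qq (r1.1, r1.2.1, false)
        if r2.2.2 then r2.2.1 else pvLoopA orig pp qq f (r2.1, r2.2.1)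

def findN (string : String) (p : Int) (q : Int) : Int :=
  pvLoopA string.toList p.toNat q.toNat (string.toList.length + 1) (string.toList, 0)

-- ===== PORT B =====
def findN_alt (string : String) (p : Int) (q : Int) : Int :=
  let d : Int := PySem.Str.findFrom (string ++ string) string 1 none  -- (string+string).index(string, 1)
  let pp : Int := if p > 0 then p else 0
  let qq : Int := if q > 0 then q else 0
  let s : Int := pp + qq
  let k0 : Int := PySem.Int.floordiv (d - 1) s
  let r : Int := d - k0 * s
  if r ≤ pp then k0 * s + pp else (k0 + 1) * s

-- ===== PRECONDITION & SPEC =====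
-- Pre_ excludes exactly the inputs on which A never returns: on the empty string A's
-- deque pop raises IndexError (or, if both p,q ≤ 0, nothing ever happens), and with
-- p ≤ 0 and q ≤ 0 both range() batches are empty, so `while True` never terminates.
def Pre_findN (string : String) (p : Int) (q : Int) : Prop :=
  string.toList ≠ [] ∧ (0 < p ∨ 0 < q)
instance (string : String) (p : Int) (q : Int) : Decidable (Pre_findN string p q) := by
  unfold Pre_findN; infer_instance

def pvWitness_findN : String × Int × Int := ("ab", 1, 1)

def Spec_findN (string : String) (p : Int) (q : Int) (out : Int) : Prop := out = findN_alt string p q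
instance (string : String) (p : Int) (q : Int) (out : Int) : Decidable (Spec_findN string p q out) := by unfold Spec_findN; infer_instance

-- ===== CLAIM (what is proved, stated in full; the proofs are below) =====
def Claim_equal_findN : Prop := ∀ (string : String) (p : Int) (q : Int), Dom_findN string p q → Pre_findN string p q → Spec_findN string p q (findN string p q)

-- ===== LEMMAS AND PROOFS =====

-- iterated right-rotation, in the order A applies it
def pvRotrN : Nat → List Char → List Char
  | 0, l => l
  | k+1, l => pvRotrN k (pvRotr l)

lemma pvRotr_rotate (l : List Char) : pvRotr (l.rotate 1) = l := by
  cases l with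
  | nil => rfl
  | cons a t =>
    rw [List.rotate_cons_succ, List.rotate_zero]
    simp [pvRotr]

lemma pvRotr_ne_nil (l : List Char) (h : l ≠ []) : pvRotr l ≠ [] := by
  cases l with
  | nil => exact absurd rfl h
  | cons a t =>
    rw [pvRotr, List.getLast?_eq_getLast_of_ne_nil h]
    simp

lemma pvRotate_pvRotr (l : List Char) (h : l ≠ []) : (pvRotr l).rotate 1 = l := by
  conv_rhs => rw [← List.dropLast_append_getLast h]
  rw [pvRotr, List.getLast?_eq_getLast_of_ne_nil h]
  rw [List.rotate_cons_succ, List.rotate_zero]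

lemma pvRotrN_rotate (k : Nat) (l : List Char) : pvRotrN k (l.rotate k) = l := by
  induction k generalizing l with
  | zero => simp [pvRotrN]
  | succ n ih =>
    have : l.rotate (n+1) = (l.rotate n).rotate 1 := by rw [List.rotate_rotate]
    rw [pvRotrN, this, pvRotr_rotate]
    exact ih l

lemma pvRotate_pvRotrN (k : Nat) (l : List Char) (h : l ≠ []) : (pvRotrN k l).rotate k = l := by
  induction k generalizing l with
  | zero => simp [pvRotrN]
  | succ n ih =>
    rw [pvRotrN, show n + 1 = n + 1 from rfl, ← List.rotate_rotate]
    rw [ih (pvRotr l) (pvRotr_ne_nil l h), pvRotate_pvRotr l h]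

lemma pvRotrN_fix_iff (t : Nat) (l : List Char) (h : l ≠ []) :
    pvRotrN t l = l ↔ l.rotate t = l := by
  constructor
  · intro hfix
    conv_lhs => rw [← hfix]
    exact pvRotate_pvRotrN t l h
  · intro hrot
    conv_lhs => rw [← hrot]
    exact pvRotrN_rotate t l

lemma pvRotrN_add (a b : Nat) (l : List Char) : pvRotrN a (pvRotrN b l) = pvRotrN (b + a) l := by
  induction b generalizing l with
  | zero => simp [pvRotrN]
  | succ n ih => rw [pvRotrN, ih, show n + 1 + a = (n + a) + 1 by omega, pvRotrN]

lemma pvRotate_of_dvd (l : List Char) (d t : Nat) (hd : l.rotate d = l) (hdvd : d ∣ t) :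
    l.rotate t = l := by
  obtain ⟨m, rfl⟩ := hdvd
  induction m with
  | zero => simp
  | succ n ih =>
    have : d * (n+1) = d * n + d := by ring
    rw [this, ← List.rotate_rotate, ih, hd]

lemma pvPeriod_dvd_iff (l : List Char) (d t : Nat) (hd1 : 0 < d) (hd2 : l.rotate d = l)
    (hdmin : ∀ u, 0 < u → l.rotate u = l → d ≤ u) :
    l.rotate t = l ↔ d ∣ t := by
  constructor
  · intro hrot
    have hdec : t = d * (t / d) + t % d := (Nat.div_add_mod t d).symm
    have hmul : l.rotate (d * (t / d)) = l := pvRotate_of_dvd l d _ hd2 (Dvd.intro _ rfl)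
    have hr : l.rotate (t % d) = l := by
      rw [hdec, ← List.rotate_rotate, hmul] at hrot
      exact hrot
    rcases Nat.eq_zero_or_pos (t % d) with h0 | hpos
    · exact Nat.dvd_of_mod_eq_zero h0
    · exact absurd (hdmin _ hpos hr) (by have := Nat.mod_lt t hd1; omega)
  · exact pvRotate_of_dvd l d t hd2

lemma pvBatchA_spec (orig : List Char) (n : Nat) (l : List Char) (t : Int) (flag : Bool) :
    pvBatchA orig n (l, t, flag) =
      (pvRotrN n l, t + (n : Int), flag || decide (∃ i, i < n ∧ pvRotrN (i+1) l = orig)) := by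
  induction n generalizing l t flag with
  | zero => simp [pvBatchA, pvRotrN]
  | succ m ih =>
    rw [pvBatchA]
    simp only []
    rw [ih]
    simp only [Prod.mk.injEq]
    refine ⟨rfl, by push_cast; ring, ?_⟩
    by_cases heq : pvRotr l = orig
    · rw [if_pos heq, Bool.true_or]
      have hex : (∃ i, i < m + 1 ∧ pvRotrN (i+1) l = orig) := ⟨0, by omega, heq⟩
      rw [decide_eq_true hex, Bool.or_true]
    · rw [if_neg heq]
      congr 1
      apply decide_eq_decide.mpr
      constructor
      · rintro ⟨i, hi, hrot⟩
        exact ⟨i+1, by omega, hrot⟩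
      · rintro ⟨i, hi, hrot⟩
        cases i with
        | zero => exact absurd hrot heq
        | succ j => exact ⟨j, by omega, hrot⟩

-- a batch of n rotations starting after `base` rotations hits the original exactly
-- when the next multiple of the period d (which is d itself, as base < d) lies inside it
lemma pvWindow (l : List Char) (d base n : Nat) (hd1 : 0 < d) (hd2 : l.rotate d = l)
    (hdmin : ∀ u, 0 < u → l.rotate u = l → d ≤ u) (h : l ≠ []) (hbase : base < d) :
    (∃ i, i < n ∧ pvRotrN (i+1) (pvRotrN base l) = l) ↔ d ≤ base + n := by
  constructor
  · rintro ⟨i, hi, hrot⟩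
    rw [pvRotrN_add, pvRotrN_fix_iff _ _ h,
        pvPeriod_dvd_iff l d _ hd1 hd2 hdmin] at hrot
    have := Nat.le_of_dvd (by omega) hrot
    omega
  · intro hle
    refine ⟨d - base - 1, by omega, ?_⟩
    rw [pvRotrN_add, show base + (d - base - 1 + 1) = d by omega,
        pvRotrN_fix_iff _ _ h]
    exact hd2

lemma pvDivPin (s b d : Nat) (hc : ∃ c, b = c * s) (h1 : b < d) (h2 : d ≤ b + s) :
    ((d-1)/s) * s = b := by
  obtain ⟨c, rfl⟩ := hc
  have hs : 0 < s := by
    rcases Nat.eq_zero_or_pos s with h0 | h; · omega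
    exact h
  have heq : (d-1)/s = c := by
    apply Nat.div_eq_of_lt_le
    · omega
    · rw [Nat.succ_mul]; omega
  rw [heq]

-- invariant of the while loop: after b completed rotations (b a whole number of
-- p+q cycles, all of them misses as b < d), the loop returns the closed-form boundary
lemma pvLoopA_spec (l : List Char) (d pp qq : Nat) (h : l ≠ []) (hd1 : 0 < d)
    (hd2 : l.rotate d = l) (hdmin : ∀ u, 0 < u → l.rotate u = l → d ≤ u) :
    ∀ (fuel b : Nat), (∃ c, b = c * (pp + qq)) → b < d → d ≤ b + fuel * (pp + qq) →
    pvLoopA l pp qq fuel (pvRotrN b l, (b : Int)) =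
      ((if d - ((d-1)/(pp+qq))*(pp+qq) ≤ pp
        then ((d-1)/(pp+qq))*(pp+qq) + pp
        else ((d-1)/(pp+qq))*(pp+qq) + (pp+qq) : Nat) : Int) := by
  intro fuel
  induction fuel with
  | zero =>
    intro b _ hb hfuel
    simp only [Nat.zero_mul] at hfuel
    omega
  | succ f ih =>
    intro b hc hb hfuel
    rw [pvLoopA]
    simp only [pvBatchA_spec, Bool.false_or]
    by_cases h1 : ∃ i, i < pp ∧ pvRotrN (i+1) (pvRotrN b l) = l
    · rw [decide_eq_true h1]
      simp only []
      have hd_le : d ≤ b + pp := (pvWindow l d b pp hd1 hd2 hdmin h hb).mp h1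
      have hpin : ((d-1)/(pp+qq))*(pp+qq) = b :=
        pvDivPin (pp+qq) b d hc hb (by omega)
      rw [hpin, if_pos (show d - b ≤ pp by omega)]
      push_cast; ring
    · rw [decide_eq_false h1]
      simp only [if_neg (Bool.false_ne_true)]
      have hd_gt : ¬ d ≤ b + pp := fun hle => h1 ((pvWindow l d b pp hd1 hd2 hdmin h hb).mpr hle)
      rw [pvRotrN_add]
      by_cases h2 : ∃ i, i < qq ∧ pvRotrN (i+1) (pvRotrN (b + pp) l) = l
      · rw [decide_eq_true h2]
        simp only []
        have hd_le2 : d ≤ (b + pp) + qq := (pvWindow l d (b+pp) qq hd1 hd2 hdmin h (by omega)).mp h2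
        have hpin : ((d-1)/(pp+qq))*(pp+qq) = b :=
          pvDivPin (pp+qq) b d hc hb (by omega)
        rw [hpin, if_neg (show ¬ d - b ≤ pp by omega)]
        push_cast; ring
      · rw [decide_eq_false h2]
        simp only [if_neg (Bool.false_ne_true)]
        have hd_gt2 : ¬ d ≤ (b + pp) + qq :=
          fun hle => h2 ((pvWindow l d (b+pp) qq hd1 hd2 hdmin h (by omega)).mpr hle)
        have := ih (b + (pp + qq)) (by obtain ⟨c, rfl⟩ := hc; exact ⟨c+1, by ring⟩)
          (by omega) (by rw [Nat.succ_mul] at hfuel; omega)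
        rw [pvRotrN_add, show b + pp + qq = b + (pp + qq) by omega,
            show ((b:Int) + (pp:Nat) + (qq:Nat)) = ((b + (pp + qq) : Nat) : Int) by push_cast; ring]
        exact this

-- the doubled string contains the original at offset j (1 ≤ j) iff j is a rotation fixing it
lemma pvPrefix_iff (l : List Char) (j : Nat) (h : l ≠ []) (hj1 : 1 ≤ j) :
    l <+: (l ++ l).drop j ↔ (j ≤ l.length ∧ l.rotate j = l) := by
  have hL : 0 < l.length := List.length_pos_iff.mpr h
  constructor
  · intro hp
    have hlen := hp.length_le
    rw [List.length_drop, List.length_append] at hlen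
    have hjL : j ≤ l.length := by omega
    refine ⟨hjL, ?_⟩
    rw [List.prefix_iff_eq_take, List.drop_append_of_le_length hjL, List.take_append] at hp
    rw [List.take_of_length_le (by simp), List.length_drop,
        show l.length - (l.length - j) = j by omega] at hp
    rw [List.rotate_eq_drop_append_take hjL, ← hp]
  · rintro ⟨hjL, hrot⟩
    rw [List.prefix_iff_eq_take, List.drop_append_of_le_length hjL, List.take_append]
    rw [List.take_of_length_le (by simp), List.length_drop,
        show l.length - (l.length - j) = j by omega]
    rw [← List.rotate_eq_drop_append_take hjL, hrot]

-- B's (s+s).index(s,1) computes exactly the minimal rotation period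
lemma pvFindFrom_eq_period (l : List Char) (d : Nat) (h : l ≠ []) (hd1 : 0 < d)
    (hd2 : l.rotate d = l) (hdmin : ∀ u, 0 < u → l.rotate u = l → d ≤ u) (hdL : d ≤ l.length) :
    PySem.Chars.findFrom (l ++ l) l 1 none = (d : Nat) := by
  have hL : 0 < l.length := List.length_pos_iff.mpr h
  have h1len : (1 : Nat) ≤ (l ++ l).length := by simp; omega
  have hpred_d : l <+: (l ++ l).drop d :=
    (pvPrefix_iff l d h hd1).mpr ⟨hdL, hd2⟩
  have hsf : (l ++ l).drop d <:+ (l ++ l).drop 1 := by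
    rw [show d = 1 + (d-1) by omega, ← List.drop_drop]
    exact List.drop_suffix _ _
  have hne : PySem.Chars.findFrom (l ++ l) l ((1:Nat) : Int) ≠ -1 := by
    intro hcon
    rw [PySem.Chars.findFrom_natCast_eq_neg_one_iff (l ++ l) l 1 h1len] at hcon
    exact hcon (hpred_d.isInfix.trans hsf.isInfix)
  obtain ⟨hk_le, hpref, hmin⟩ := PySem.Chars.findFrom_natCast_spec (l ++ l) l 1 h1len hne
  have hv1 : 1 ≤ (PySem.Chars.findFrom (l ++ l) l ((1:Nat) : Int)).toNat := by omega
  have hpv := (pvPrefix_iff l _ h hv1).mp hpref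
  have hge : d ≤ (PySem.Chars.findFrom (l ++ l) l ((1:Nat) : Int)).toNat :=
    hdmin _ (by omega) hpv.2
  have hle : (PySem.Chars.findFrom (l ++ l) l ((1:Nat) : Int)).toNat ≤ d := by
    by_contra hlt
    exact hmin d hd1 (by omega) hpred_d
  have : (PySem.Chars.findFrom (l ++ l) l ((1:Nat) : Int)).toNat = d := by omega
  rw [show ((1:Nat) : Int) = (1 : Int) by simp] at this
  omega

-- ===== VERDICT (by name: the statement is the Claim_ definition above) =====
theorem findN_spec : Claim_equal_findN := by
  intro string p q _ hPre
  obtain ⟨hne', hpq⟩ := hPre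
  unfold Spec_findN findN findN_alt
  dsimp only
  set l := string.toList with hl
  have hne : l ≠ [] := hne'
  have hL : 0 < l.length := List.length_pos_iff.mpr hne
  have hex : ∃ t, 0 < t ∧ l.rotate t = l := ⟨l.length, hL, List.rotate_length l⟩
  set d := Nat.find hex with hdd
  have hd := Nat.find_spec hex
  have hdmin : ∀ u, 0 < u → l.rotate u = l → d ≤ u := fun u hu hr => Nat.find_min' hex ⟨hu, hr⟩
  have hdL : d ≤ l.length := Nat.find_min' hex ⟨hL, List.rotate_length l⟩
  have hs : 0 < p.toNat + q.toNat := by omega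
  have hA := pvLoopA_spec l d p.toNat q.toNat hne hd.1 hd.2 hdmin
    (l.length + 1) 0 ⟨0, by ring⟩ hd.1
    (by have := Nat.le_mul_of_pos_right (l.length + 1) hs; omega)
  have h0 : pvRotrN 0 l = l := rfl
  rw [h0, Nat.cast_zero] at hA
  rw [hA]
  have hB : PySem.Str.findFrom (string ++ string) string 1 none = ((d : Nat) : Int) := by
    rw [PySem.Str.findFrom_eq, String.toList_append, ← hl]
    exact pvFindFrom_eq_period l d hne hd.1 hd.2 hdmin hdL
  rw [hB]
  have hppI : (if p > 0 then p else 0) = ((p.toNat : Nat) : Int) := by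
    split_ifs with h' <;> omega
  have hqqI : (if q > 0 then q else 0) = ((q.toNat : Nat) : Int) := by
    split_ifs with h' <;> omega
  rw [hppI, hqqI]
  set pp := p.toNat
  set qq := q.toNat
  rw [show ((pp : Int) + (qq : Int)) = ((pp + qq : Nat) : Int) by push_cast; ring,
      show ((d : Nat) : Int) - 1 = ((d - 1 : Nat) : Int) by omega,
      PySem.Int.floordiv_natCast]
  set k0 := (d - 1) / (pp + qq) with hk0
  have hkle : k0 * (pp + qq) ≤ d - 1 := Nat.div_mul_le_self _ _
  rw [show ((k0 : Int) * ((pp + qq : Nat) : Int)) = ((k0 * (pp + qq) : Nat) : Int) by push_cast; ring,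
      show (((k0 : Int) + 1) * ((pp + qq : Nat) : Int)) = ((k0 * (pp + qq) + (pp + qq) : Nat) : Int) by push_cast; ring]
  set K := k0 * (pp + qq)
  split_ifs with h1 h2 <;> omega
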